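-- pv_equiv track=rewrite | github.com/brunomsaraiva/brunomsaraiva.github.io | .scripts/generate_publications.py | create_markdown
-- ===== SOURCE A (Python) =====
-- from typing import List, Dict, Optional
--
-- PublicationData = Dict[str, Optional[str]]
--
-- def create_markdown(publications: List[PublicationData]) -> str:
--     """Create a markdown file listing publications with detailed information."""
--     markdown_content = "# Publications\n\n"
--
--     # Organize publications by year
--     publications_by_year: Dict[str, List[PublicationData]] = {}
--
--     for paper in publications:
--         # Extract year
--         year = paper.get("year", "Unknown")
--
--         # Extract title
--         title = paper.get("title", "No Title")
--
--         # Extract URL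
--         url = paper.get("url", "")
--
--         # Extract authors
--         authors = paper.get("authors", "Unknown")
--
--         # Extract journal
--         journal = paper.get("journal", "Unknown")
--
--         # Extract DOI
--         doi = paper.get("doi", "No DOI")
--
--         if year not in publications_by_year:
--             publications_by_year[year] = []
--         publications_by_year[year].append({
--             "title": title,
--             "authors": authors,
--             "journal": journal,
--             "doi": doi,
--             "link": url
--         })
--
--     # Generate Markdown content
--     for year, works in sorted(publications_by_year.items(), reverse=True):
--         markdown_content += f"## {year}\n\n"
--         for work in works:
--             markdown_content += f"### {work['title']}\n"
--             markdown_content += f"- **Authors**: {work['authors']}\n"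
--             markdown_content += f"- **Journal**: {work['journal']}\n"
--             markdown_content += f"- **DOI**: {work['doi']}\n"
--             markdown_content += f"- **Link**: [View Publication]({work['link']})\n"
--             markdown_content += "\n"
--
--     return markdown_content
-- ===== SOURCE B (Python) =====
-- def create_markdown(publications):
--     """Create a markdown file listing publications with detailed information."""
--     parts = ["# Publications\n\n"]
--     # distinct years in first-appearance order, then sorted descending (key=str so an
--     # all-None input sorts; mixed None/str years are outside the stated precondition)
--     years = list(dict.fromkeys(p.get("year", "Unknown") for p in publications))
--     years.sort(key=str, reverse=True)
--     for year in years: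
--         parts.append(f"## {year}\n\n")
--         for p in publications:
--             if p.get("year", "Unknown") == year:
--                 parts.append(
--                     f"### {p.get('title', 'No Title')}\n"
--                     f"- **Authors**: {p.get('authors', 'Unknown')}\n"
--                     f"- **Journal**: {p.get('journal', 'Unknown')}\n"
--                     f"- **DOI**: {p.get('doi', 'No DOI')}\n"
--                     f"- **Link**: [View Publication]({p.get('url', '')})\n\n"
--                 )
--     return "".join(parts)
-- ===== Notes on version B (the rewrite author's own statement) =====
-- stated objective: alternative
-- what changed: Replaces A's year-keyed dict of work-dicts (grouping pass, then a sort of the items) by a dict-free decomposition: deduplicate the year values, sort them descending with key=str, and emit each year's section by filtering the publication list directly.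
import Mathlib
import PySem

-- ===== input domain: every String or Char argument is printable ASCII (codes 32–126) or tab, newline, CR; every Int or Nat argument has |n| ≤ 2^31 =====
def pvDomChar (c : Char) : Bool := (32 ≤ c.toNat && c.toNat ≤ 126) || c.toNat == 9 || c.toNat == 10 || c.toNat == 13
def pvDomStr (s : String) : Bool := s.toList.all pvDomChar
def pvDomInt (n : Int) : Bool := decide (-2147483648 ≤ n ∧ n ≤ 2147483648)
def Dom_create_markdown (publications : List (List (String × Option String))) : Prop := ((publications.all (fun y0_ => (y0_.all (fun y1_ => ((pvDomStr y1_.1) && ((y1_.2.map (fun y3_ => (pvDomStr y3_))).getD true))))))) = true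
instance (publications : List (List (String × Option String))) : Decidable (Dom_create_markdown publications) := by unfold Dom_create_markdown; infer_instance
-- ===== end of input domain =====

-- B groups without the year-keyed dict: it sorts the distinct years (descending, key=str) and
-- emits each year's papers by a filtering pass; same output wherever A returns ('alternative').

-- shared helpers: paper.get(k, dflt) on the paper dict, and f-string rendering of Optional[str]
def pvGet (p : List (String × Option String)) (k : String) (dflt : Option String) : Option String :=
  ((PySem.Dict.mk p).get? k).getD dflt

def pyStrOpt : Option String → String
  | none => "None"
  | some s => s

-- ===== PORT A =====
def create_markdown (publications : List (List (String × Option String))) : String :=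
  let markdown0 := "# Publications\n\n"
  -- grouping loop: 'if year not in d: d[year] = []' followed by 'd[year].append(work)'
  -- is exactly Dict.modify with default [] (same lookup, same insertion position)
  let publications_by_year : PySem.Dict (Option String) (List (PySem.Dict String (Option String))) :=
    publications.foldl (fun d paper =>
      let year := pvGet paper "year" (some "Unknown")
      let title := pvGet paper "title" (some "No Title")
      let url := pvGet paper "url" (some "")
      let authors := pvGet paper "authors" (some "Unknown")
      let journal := pvGet paper "journal" (some "Unknown")
      let doi := pvGet paper "doi" (some "No DOI")
      d.modify year [] (fun ws => ws ++
        [PySem.Dict.ofList [("title", title), ("authors", authors), ("journal", journal),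
                            ("doi", doi), ("link", url)]])) PySem.Dict.empty
  -- sorted(d.items(), reverse=True): the dict's keys are distinct, so Python's tuple comparison
  -- is decided by the year alone; we sort by str(year), which agrees with Python's comparison on
  -- every input where Python's sort returns (Pre_ excludes the mixed None/str TypeError inputs)
  (PySem.List.sorted publications_by_year.items (fun kv => pyStrOpt kv.1) true).foldl
    (fun md kv =>
      kv.2.foldl (fun md work =>
        -- work['title'] etc.: the five keys are always present, so dict indexing cannot raise;
        -- ported as get? with an (unreachable) none default
        md ++ "### " ++ pyStrOpt ((work.get? "title").getD none) ++ "\n"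
           ++ "- **Authors**: " ++ pyStrOpt ((work.get? "authors").getD none) ++ "\n"
           ++ "- **Journal**: " ++ pyStrOpt ((work.get? "journal").getD none) ++ "\n"
           ++ "- **DOI**: " ++ pyStrOpt ((work.get? "doi").getD none) ++ "\n"
           ++ "- **Link**: [View Publication](" ++ pyStrOpt ((work.get? "link").getD none) ++ ")\n"
           ++ "\n")
        (md ++ "## " ++ pyStrOpt kv.1 ++ "\n\n"))
    markdown0

-- ===== PORT B =====
def create_markdown_alt (publications : List (List (String × Option String))) : String :=
  let parts0 : List String := ["# Publications\n\n"]
  let years : List (Option String) :=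
    PySem.List.dedup (publications.map (fun p => pvGet p "year" (some "Unknown")))
  let syears := PySem.List.sorted years (fun y => pyStrOpt y) true   -- years.sort(key=str, reverse=True)
  let parts := syears.foldl (fun parts year =>
      publications.foldl (fun parts p =>
        if pvGet p "year" (some "Unknown") == year then
          parts ++ ["### " ++ pyStrOpt (pvGet p "title" (some "No Title")) ++ "\n"
            ++ "- **Authors**: " ++ pyStrOpt (pvGet p "authors" (some "Unknown")) ++ "\n"
            ++ "- **Journal**: " ++ pyStrOpt (pvGet p "journal" (some "Unknown")) ++ "\n"
            ++ "- **DOI**: " ++ pyStrOpt (pvGet p "doi" (some "No DOI")) ++ "\n"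
            ++ "- **Link**: [View Publication](" ++ pyStrOpt (pvGet p "url" (some "")) ++ ")\n"
            ++ "\n"]
        else parts)
        (parts ++ ["## " ++ pyStrOpt year ++ "\n\n"]))
    parts0
  PySem.Str.join "" parts

-- ===== PRECONDITION & SPEC =====
-- Pre_ excludes exactly the inputs on which Python A raises TypeError: two or more distinct
-- year values of which one is None make sorted() compare None with str.
def Pre_create_markdown (publications : List (List (String × Option String))) : Prop :=
  (PySem.List.dedup (publications.map (fun p => pvGet p "year" (some "Unknown")))).length ≤ 1
  ∨ ∀ p ∈ publications, pvGet p "year" (some "Unknown") ≠ none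
instance (publications : List (List (String × Option String))) : Decidable (Pre_create_markdown publications) := by unfold Pre_create_markdown; infer_instance

def pvWitness_create_markdown : (List (List (String × Option String))) :=
  [[("year", some "2021"), ("title", some "NanoPyx")], [("year", some "2020"), ("doi", some "10.1/x")]]

def Spec_create_markdown (publications : List (List (String × Option String))) (out : String) : Prop := out = create_markdown_alt publications
instance (publications : List (List (String × Option String))) (out : String) : Decidable (Spec_create_markdown publications out) := by unfold Spec_create_markdown; infer_instance

-- ===== CLAIM (what is proved, stated in full; the proofs are below) =====
def Claim_equal_create_markdown : Prop := ∀ (publications : List (List (String × Option String))), Dom_create_markdown publications → Pre_create_markdown publications → Spec_create_markdown publications (create_markdown publications)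

-- ===== LEMMAS AND PROOFS =====

-- abbreviations for the proof
def pvYr (p : List (String × Option String)) : Option String := pvGet p "year" (some "Unknown")

def pvWork (p : List (String × Option String)) : PySem.Dict String (Option String) :=
  PySem.Dict.ofList [("title", pvGet p "title" (some "No Title")),
                     ("authors", pvGet p "authors" (some "Unknown")),
                     ("journal", pvGet p "journal" (some "Unknown")),
                     ("doi", pvGet p "doi" (some "No DOI")),
                     ("link", pvGet p "url" (some ""))]

def pvABlk (w : PySem.Dict String (Option String)) : String :=
  "### " ++ pyStrOpt ((w.get? "title").getD none) ++ "\n"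
    ++ "- **Authors**: " ++ pyStrOpt ((w.get? "authors").getD none) ++ "\n"
    ++ "- **Journal**: " ++ pyStrOpt ((w.get? "journal").getD none) ++ "\n"
    ++ "- **DOI**: " ++ pyStrOpt ((w.get? "doi").getD none) ++ "\n"
    ++ "- **Link**: [View Publication](" ++ pyStrOpt ((w.get? "link").getD none) ++ ")\n"
    ++ "\n"

def pvBlk (p : List (String × Option String)) : String :=
  "### " ++ pyStrOpt (pvGet p "title" (some "No Title")) ++ "\n"
    ++ "- **Authors**: " ++ pyStrOpt (pvGet p "authors" (some "Unknown")) ++ "\n"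
    ++ "- **Journal**: " ++ pyStrOpt (pvGet p "journal" (some "Unknown")) ++ "\n"
    ++ "- **DOI**: " ++ pyStrOpt (pvGet p "doi" (some "No DOI")) ++ "\n"
    ++ "- **Link**: [View Publication](" ++ pyStrOpt (pvGet p "url" (some "")) ++ ")\n"
    ++ "\n"

def pvHdr (y : Option String) : String := "## " ++ pyStrOpt y ++ "\n\n"

def pvCat (l : List String) : String := PySem.Str.join "" l

lemma pvCat_nil : pvCat [] = "" := rfl

lemma pvCat_cons (x : String) (l : List String) : pvCat (x :: l) = x ++ pvCat l := by
  cases l with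
  | nil => simp [pvCat, PySem.Str.join, PySem.Chars.join_singleton, PySem.Chars.join_nil]
  | cons y t =>
    apply String.toList_inj.mp
    simp [pvCat, PySem.Str.join, PySem.Chars.join_cons_cons, String.toList_append]

lemma pvCat_append (a b : List String) : pvCat (a ++ b) = pvCat a ++ pvCat b := by
  induction a with
  | nil => simp [pvCat_nil]
  | cons x t ih => simp [pvCat_cons, ih, String.append_assoc]

lemma pvCat_flatMap {α : Type} (G : α → List String) (l : List α) :
    pvCat (l.flatMap G) = pvCat (l.map (fun y => pvCat (G y))) := by
  induction l with
  | nil => rfl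
  | cons x t ih => simp [List.flatMap_cons, pvCat_append, pvCat_cons, ih]

lemma pvFoldl_str {α : Type} (f : α → String) (l : List α) (s : String) :
    l.foldl (fun md x => md ++ f x) s = s ++ pvCat (l.map f) := by
  induction l generalizing s with
  | nil => simp [pvCat_nil]
  | cons x t ih => simp [List.foldl_cons, ih, pvCat_cons, String.append_assoc]

lemma pvABlk_work (p : List (String × Option String)) : pvABlk (pvWork p) = pvBlk p := by
  simp [pvABlk, pvWork, pvBlk, PySem.Dict.ofList, PySem.Dict.update,
        PySem.Dict.get?_insert_self, PySem.Dict.get?_insert_of_ne]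

-- stable sort commutes with mapping along the key
lemma pvInsertBy_map {α β : Type} (g : α → β) (bf : β → β → Bool) (bg : α → α → Bool)
    (h : ∀ a b, bf (g a) (g b) = bg a b) (x : α) (l : List α) :
    PySem.List.insertBy bf (g x) (l.map g) = (PySem.List.insertBy bg x l).map g := by
  induction l with
  | nil => rfl
  | cons y t ih =>
    simp only [List.map_cons, PySem.List.insertBy, h]
    by_cases hb : bg x y = true
    · simp [hb]
    · simp [hb, ih]

lemma pvSorted_rev_map {α β κ : Type} [LinearOrder κ] (g : α → β) (key : β → κ) (l : List α) :
    PySem.List.sorted (l.map g) key true = (PySem.List.sorted l (fun a => key (g a)) true).map g := by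
  rw [PySem.List.sorted_rev_eq_foldl_insertBy, PySem.List.sorted_rev_eq_foldl_insertBy]
  rw [List.foldl_map]
  have main : ∀ (t : List α) (acc : List α),
      t.foldl (fun acc x => PySem.List.insertBy (fun a b => decide (key b < key a)) (g x) acc) (acc.map g)
        = (t.foldl (fun acc x => PySem.List.insertBy (fun a b => decide (key (g b) < key (g a))) x acc) acc).map g := by
    intro t
    induction t with
    | nil => intro acc; rfl
    | cons x r ih =>
      intro acc
      simp only [List.foldl_cons]
      rw [pvInsertBy_map g _ _ (fun a b => rfl), ih]
  simpa using main l []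

-- the grouping dict of port A, characterised
def pvGroup (publications : List (List (String × Option String))) :
    PySem.Dict (Option String) (List (PySem.Dict String (Option String))) :=
  publications.foldl (fun d p => d.modify (pvYr p) [] (fun ws => ws ++ [pvWork p])) PySem.Dict.empty

lemma pvGroup_keys (pubs : List (List (String × Option String))) :
    (pvGroup pubs).keys = PySem.List.dedup (pubs.map pvYr) := by
  unfold pvGroup
  rw [PySem.Dict.keys_foldl_modify_key pubs pvYr [] (fun _ p ws => ws ++ [pvWork p]) PySem.Dict.empty]
  simp [PySem.Set.update_nil_left]

lemma pvGroup_keys_nodup (pubs : List (List (String × Option String))) :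
    (pvGroup pubs).keys.Nodup := by
  unfold pvGroup
  exact PySem.Dict.nodup_keys_foldl_modify_key pubs pvYr [] (fun _ p ws => ws ++ [pvWork p])
    PySem.Dict.empty (by simp)

lemma pvGroup_getD (pubs : List (List (String × Option String))) (y : Option String) :
    (pvGroup pubs).getD y [] = (pubs.filter (fun p => pvYr p == y)).map pvWork := by
  unfold pvGroup
  have h1 : pubs.foldl (fun d p => d.modify (pvYr p) [] (fun ws => ws ++ [pvWork p])) PySem.Dict.empty
      = (pubs.map (fun p => (pvYr p, pvWork p))).foldl
          (fun d q => d.modify q.1 [] (fun ws => ws ++ [q.2])) PySem.Dict.empty := by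
    rw [List.foldl_map]
  rw [h1, PySem.Dict.getD_foldl_modify_append]
  simp [List.filter_map, List.map_map, Function.comp_def]

lemma pvGroup_items (pubs : List (List (String × Option String))) :
    (pvGroup pubs).items = (PySem.List.dedup (pubs.map pvYr)).map
      (fun y => (y, (pubs.filter (fun p => pvYr p == y)).map pvWork)) := by
  rw [PySem.Dict.items_eq_map_keys (pvGroup pubs) (pvGroup_keys_nodup pubs) []]
  rw [pvGroup_keys]
  exact List.map_congr_left (fun y _ => by rw [pvGroup_getD])

-- both ports equal the same canonical string, unconditionally
lemma pv_main (pubs : List (List (String × Option String))) :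
    create_markdown pubs = create_markdown_alt pubs := by
  have hA : create_markdown pubs
      = "# Publications\n\n" ++ pvCat ((PySem.List.sorted (PySem.List.dedup (pubs.map pvYr)) (fun y => pyStrOpt y) true).map
          (fun y => pvHdr y ++ pvCat ((pubs.filter (fun p => pvYr p == y)).map pvBlk))) := by
    show (PySem.List.sorted (pvGroup pubs).items (fun kv => pyStrOpt kv.1) true).foldl _ _ = _
    rw [pvGroup_items]
    rw [pvSorted_rev_map (fun y => (y, (pubs.filter (fun p => pvYr p == y)).map pvWork))
        (fun kv => pyStrOpt kv.1)]
    rw [List.foldl_map]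
    have hstep : ∀ (md : String) (y : Option String),
        ((pubs.filter (fun p => pvYr p == y)).map pvWork).foldl
            (fun md work => md ++ "### " ++ pyStrOpt ((work.get? "title").getD none) ++ "\n"
              ++ "- **Authors**: " ++ pyStrOpt ((work.get? "authors").getD none) ++ "\n"
              ++ "- **Journal**: " ++ pyStrOpt ((work.get? "journal").getD none) ++ "\n"
              ++ "- **DOI**: " ++ pyStrOpt ((work.get? "doi").getD none) ++ "\n"
              ++ "- **Link**: [View Publication](" ++ pyStrOpt ((work.get? "link").getD none) ++ ")\n"
              ++ "\n")
            (md ++ "## " ++ pyStrOpt y ++ "\n\n")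
          = md ++ (pvHdr y ++ pvCat ((pubs.filter (fun p => pvYr p == y)).map pvBlk)) := by
      intro md y
      have hfun : (fun (md : String) (work : PySem.Dict String (Option String)) =>
          md ++ "### " ++ pyStrOpt ((work.get? "title").getD none) ++ "\n"
            ++ "- **Authors**: " ++ pyStrOpt ((work.get? "authors").getD none) ++ "\n"
            ++ "- **Journal**: " ++ pyStrOpt ((work.get? "journal").getD none) ++ "\n"
            ++ "- **DOI**: " ++ pyStrOpt ((work.get? "doi").getD none) ++ "\n"
            ++ "- **Link**: [View Publication](" ++ pyStrOpt ((work.get? "link").getD none) ++ ")\n"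
            ++ "\n")
          = (fun md work => md ++ pvABlk work) := by
        funext md w
        simp [pvABlk, String.append_assoc]
      rw [hfun, pvFoldl_str]
      rw [List.map_map]
      have : (pvABlk ∘ pvWork) = pvBlk := funext pvABlk_work
      rw [this]
      simp [pvHdr, String.append_assoc]
    simp only [hstep]
    rw [pvFoldl_str]
  have hB : create_markdown_alt pubs
      = pvCat (["# Publications\n\n"] ++ (PySem.List.sorted (PySem.List.dedup (pubs.map pvYr)) (fun y => pyStrOpt y) true).flatMap
          (fun y => ["## " ++ pyStrOpt y ++ "\n\n"] ++ (pubs.filter (fun p => pvYr p == y)).map pvBlk)) := by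
    show PySem.Str.join "" _ = _
    congr 1
    have hstepB : ∀ (parts : List String) (y : Option String),
        pubs.foldl (fun parts p =>
            if pvGet p "year" (some "Unknown") == y then
              parts ++ ["### " ++ pyStrOpt (pvGet p "title" (some "No Title")) ++ "\n"
                ++ "- **Authors**: " ++ pyStrOpt (pvGet p "authors" (some "Unknown")) ++ "\n"
                ++ "- **Journal**: " ++ pyStrOpt (pvGet p "journal" (some "Unknown")) ++ "\n"
                ++ "- **DOI**: " ++ pyStrOpt (pvGet p "doi" (some "No DOI")) ++ "\n"
                ++ "- **Link**: [View Publication](" ++ pyStrOpt (pvGet p "url" (some "")) ++ ")\n"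
                ++ "\n"]
            else parts)
          (parts ++ ["## " ++ pyStrOpt y ++ "\n\n"])
        = parts ++ (["## " ++ pyStrOpt y ++ "\n\n"] ++ (pubs.filter (fun p => pvYr p == y)).map pvBlk) := by
      intro parts y
      exact (PySem.List.foldl_append_if (fun p => pvYr p == y) pvBlk pubs
            (parts ++ ["## " ++ pyStrOpt y ++ "\n\n"])).trans (List.append_assoc _ _ _)
    simp only [hstepB]
    rw [PySem.List.foldl_append_eq_flatMap]
    rfl
  rw [hA, hB, pvCat_append]
  have h1 : pvCat ["# Publications\n\n"] = "# Publications\n\n" := by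
    rw [pvCat_cons, pvCat_nil]; simp
  rw [h1, pvCat_flatMap]
  have h2 : ∀ y : Option String,
      pvCat (["## " ++ pyStrOpt y ++ "\n\n"] ++ (pubs.filter (fun p => pvYr p == y)).map pvBlk)
        = pvHdr y ++ pvCat ((pubs.filter (fun p => pvYr p == y)).map pvBlk) := by
    intro y
    rw [pvCat_append, pvCat_cons, pvCat_nil]
    simp [pvHdr, String.append_assoc]
  simp only [h2]

-- ===== VERDICT (by name: the statement is the Claim_ definition above) =====
theorem create_markdown_spec : Claim_equal_create_markdown := by
  intro pubs _ _
  unfold Spec_create_markdown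
  exact pv_main pubs
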